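-- pv_equiv track=rewrite | github.com/christianebacani/Roadmap | Coding Challenges using Python and SQL/Code Wars Python Solved Problems/7 Kyu/heggeleggleggo.py | heggeleggleggo
-- ===== SOURCE A (Python) =====
-- def heggeleggleggo(word: str) -> str:
--     consonants = 'bcdfghjklmnpqrstvwxyz'
--     result = ''
--
--     for i in range(len(word)):
--         if word[i].lower() in consonants:
--             result += (word[i] + 'egg')
--
--         else:
--             result += word[i]
--
--     return result
-- ===== SOURCE B (Python) =====
-- import re
--
-- def heggeleggleggo(word: str) -> str:
--     return re.sub(r'([bcdfghjklmnpqrstvwxyz])', r'\1egg', word, flags=re.IGNORECASE)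
-- ===== Notes on version B (the rewrite author's own statement) =====
-- stated objective: idiomatic
-- what changed: Replaced the explicit index loop with string concatenation by a single case-insensitive regex substitution that rewrites each consonant to itself followed by the suffix.
import Mathlib
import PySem

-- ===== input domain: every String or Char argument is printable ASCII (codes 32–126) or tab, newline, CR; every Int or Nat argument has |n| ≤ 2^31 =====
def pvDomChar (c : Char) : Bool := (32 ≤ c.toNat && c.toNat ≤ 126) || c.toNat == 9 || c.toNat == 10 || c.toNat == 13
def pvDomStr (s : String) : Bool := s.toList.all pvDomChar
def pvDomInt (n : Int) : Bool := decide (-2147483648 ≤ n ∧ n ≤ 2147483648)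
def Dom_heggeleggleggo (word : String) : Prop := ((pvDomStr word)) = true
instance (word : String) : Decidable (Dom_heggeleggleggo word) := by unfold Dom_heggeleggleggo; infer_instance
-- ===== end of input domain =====

-- B replaces A's index loop and if/else concatenation by a single regex-style substitution
-- (each consonant rewritten to itself + "egg"); objective: idiomatic.

-- ===== PORT A =====
-- for i in range(len(word)): if word[i].lower() in consonants: result += word[i]+'egg' else: result += word[i]
def heggeleggleggo (word : String) : String :=
  let consonants := "bcdfghjklmnpqrstvwxyz"
  (PySem.List.pyRange 0 (PySem.Str.len word) 1).foldl
    (fun result i =>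
      let c := PySem.List.pyGetD word.toList i ' '
      if PySem.Str.isIn (String.ofList [PySem.Chars.lowerChar c]) consonants then
        result ++ (String.ofList [c] ++ "egg")
      else
        result ++ String.ofList [c]) ""

-- ===== PORT B =====
-- re.sub(r'([bcdfghjklmnpqrstvwxyz])', r'\1egg', word, flags=re.IGNORECASE): the regex engine
-- scans the string and rewrites every match (here: one consonant, compared case-insensitively)
-- to itself followed by 'egg'; ported by hand as a flatMap over the code points (exact for this
-- single-character pattern on the ASCII domain).
def pvConsonant (c : Char) : Bool :=
  "bcdfghjklmnpqrstvwxyz".toList.contains (PySem.Chars.lowerChar c)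

def heggeleggleggo_alt (word : String) : String :=
  String.ofList (word.toList.flatMap (fun c => if pvConsonant c then [c, 'e', 'g', 'g'] else [c]))

-- ===== PRECONDITION & SPEC =====
def Spec_heggeleggleggo (word : String) (out : String) : Prop := out = heggeleggleggo_alt word
instance (word : String) (out : String) : Decidable (Spec_heggeleggleggo word out) := by unfold Spec_heggeleggleggo; infer_instance

-- ===== CLAIM (what is proved, stated in full; the proofs are below) =====
def Claim_equal_heggeleggleggo : Prop := ∀ (word : String), Dom_heggeleggleggo word → Spec_heggeleggleggo word (heggeleggleggo word)

-- ===== LEMMAS AND PROOFS =====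

-- 'x in s' on a one-character string is list membership.
lemma pv_isIn_singleton (c : Char) (l : List Char) : PySem.Chars.isIn [c] l = l.contains c := by
  rw [Bool.eq_iff_iff]
  simp only [PySem.Chars.isIn_iff_infix, List.contains_iff_mem]
  exact ⟨fun h => h.mem (by simp), fun h => by
    obtain ⟨s, t, rfl⟩ := List.append_of_mem h
    exact ⟨s, t, by simp⟩⟩

-- A's per-character membership test agrees with B's consonant predicate.
lemma pv_test_eq (c : Char) :
    PySem.Str.isIn (String.ofList [PySem.Chars.lowerChar c]) "bcdfghjklmnpqrstvwxyz"
      = pvConsonant c := by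
  simp [PySem.Str.isIn_eq, pv_isIn_singleton, pvConsonant]

-- A's loop body, after the index has been resolved to the character.
lemma pv_loop_eq (cs : List Char) (acc : String) :
    cs.foldl
      (fun result c =>
        if pvConsonant c then result ++ (String.ofList [c] ++ "egg")
        else result ++ String.ofList [c]) acc
      = acc ++ String.ofList (cs.flatMap (fun c => if pvConsonant c then [c, 'e', 'g', 'g'] else [c])) := by
  induction cs generalizing acc with
  | nil => simp
  | cons c cs ih =>
    cases h : pvConsonant c <;>
      simp only [List.foldl_cons, List.flatMap_cons, h, Bool.false_eq_true, ite_false, ite_true] <;>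
      rw [ih] <;> simp [String.ext_iff]

theorem pv_main (word : String) :
    heggeleggleggo word = heggeleggleggo_alt word := by
  unfold heggeleggleggo heggeleggleggo_alt
  dsimp only
  rw [show PySem.Str.len word = (word.toList.length : Int) from by simp]
  rw [PySem.List.foldl_pyRange_zero_pyGetD' word.toList ' '
      (fun result c =>
        if PySem.Str.isIn (String.ofList [PySem.Chars.lowerChar c]) "bcdfghjklmnpqrstvwxyz" then
          result ++ (String.ofList [c] ++ "egg")
        else result ++ String.ofList [c]) ""]
  simp only [pv_test_eq]
  rw [pv_loop_eq]
  simp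

-- ===== VERDICT (by name: the statement is the Claim_ definition above) =====
theorem heggeleggleggo_spec : Claim_equal_heggeleggleggo := by
  intro word _
  exact pv_main word
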